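-- pv_equiv track=rewrite | github.com/RahulKB31/Python-Challenge-Codes | p21.py | fib_multiple
-- ===== SOURCE A (Python) =====
-- def fib(n, memo):
--     if n == 1 or n == 2:
--         return 1
--     if memo[n] != 0:
--         return memo[n]
--     memo[n] = fib(n-1, memo) + fib(n-2, memo)
--     return memo[n]
--
-- def fib_multiple(k, n):
--     memo = [0] * 100
--     count = 0
--     for i in range(1, 100):
--         if fib(i, memo) % k == 0:
--             count += 1
--             if count == n:
--                 return i
--     return -1
-- ===== SOURCE B (Python) =====
-- def fib_multiple(k, n):
--     count = 0
--     a, b = 1, 1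
--     for i in range(1, 100):
--         if a % k == 0:
--             count += 1
--             if count == n:
--                 return i
--         a, b = b, a + b
--     return -1
-- ===== Notes on version B (the rewrite author's own statement) =====
-- stated objective: simpler
-- what changed: Replaced the recursive memoized fib helper (with a shared 100-slot memo list threaded through the loop) by an iterative two-variable rolling Fibonacci computed inline in the single loop.
import Mathlib
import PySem

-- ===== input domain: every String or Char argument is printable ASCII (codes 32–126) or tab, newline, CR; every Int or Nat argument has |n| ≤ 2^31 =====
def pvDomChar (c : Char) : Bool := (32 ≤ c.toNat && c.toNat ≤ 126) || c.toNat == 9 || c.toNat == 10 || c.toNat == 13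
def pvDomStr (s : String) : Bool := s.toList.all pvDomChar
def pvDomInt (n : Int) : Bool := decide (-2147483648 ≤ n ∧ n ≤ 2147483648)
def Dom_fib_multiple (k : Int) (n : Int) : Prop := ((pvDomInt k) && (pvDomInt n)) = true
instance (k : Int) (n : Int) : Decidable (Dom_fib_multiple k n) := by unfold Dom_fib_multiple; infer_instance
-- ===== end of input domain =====

-- B replaces A's recursive memoized fib helper by two rolling variables inside the
-- single loop (simpler decomposition, same result).

-- ===== PORT A =====
-- fib(n, memo): memoized recursion; `fuel` only makes the recursion structural — in
-- all calls made by fib_multiple (n ≥ 1, fuel = n) the fuel-0 branch is unreachable.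
-- memo[n] is read with getD: inside fib_multiple all indices are < 100 = memo length.
def fibA (fuel : Nat) (n : Nat) (memo : List Int) : Int × List Int :=
    if n = 1 ∨ n = 2 then (1, memo)
    else if memo.getD n 0 ≠ 0 then (memo.getD n 0, memo)
    else match fuel with
      | 0 => (0, memo)  -- unreachable in fib_multiple's calls
      | fuel + 1 =>
        let p := fibA fuel (n - 1) memo
        let q := fibA fuel (n - 2) p.2
        (p.1 + q.1, q.2.set n (p.1 + q.1))

-- the for-loop of A over i in range(1, 100), threading memo and count
def loopA (k n : Int) (i : Nat) (memo : List Int) (count : Int) : Int :=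
  if _h : i < 100 then
    let r := fibA i i memo
    if PySem.Int.mod r.1 k = 0 then
      if count + 1 = n then (i : Int) else loopA k n (i + 1) r.2 (count + 1)
    else loopA k n (i + 1) r.2 count
  else -1
termination_by 100 - i

def fib_multiple (k : Int) (n : Int) : Int :=
  loopA k n 1 (List.replicate 100 0) 0

-- ===== PORT B =====
-- the for-loop of B: a, b are the rolling Fibonacci pair at index i
def loopB (k n : Int) (i : Nat) (a b count : Int) : Int :=
  if _h : i < 100 then
    if PySem.Int.mod a k = 0 then
      if count + 1 = n then (i : Int) else loopB k n (i + 1) b (a + b) (count + 1)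
    else loopB k n (i + 1) b (a + b) count
  else -1
termination_by 100 - i

def fib_multiple_alt (k : Int) (n : Int) : Int :=
  loopB k n 1 1 1 0

-- ===== PRECONDITION & SPEC =====
-- k = 0 makes `% k` raise ZeroDivisionError in both Pythons, so it is excluded.
def Pre_fib_multiple (k : Int) (n : Int) : Prop := k ≠ 0
instance (k : Int) (n : Int) : Decidable (Pre_fib_multiple k n) := by unfold Pre_fib_multiple; infer_instance
def pvWitness_fib_multiple : Int × Int := (2, 1)

def Spec_fib_multiple (k : Int) (n : Int) (out : Int) : Prop := out = fib_multiple_alt k n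
instance (k : Int) (n : Int) (out : Int) : Decidable (Spec_fib_multiple k n out) := by unfold Spec_fib_multiple; infer_instance

-- ===== CLAIM (what is proved, stated in full; the proofs are below) =====
def Claim_equal_fib_multiple : Prop := ∀ (k : Int) (n : Int), Dom_fib_multiple k n → Pre_fib_multiple k n → Spec_fib_multiple k n (fib_multiple k n)

-- ===== LEMMAS AND PROOFS =====

-- the ideal memo state after the loop has processed indices 1..m
def goodMemo (m : Nat) : List Int :=
  (List.range 100).map (fun j => if 3 ≤ j ∧ j ≤ m then (Nat.fib j : Int) else 0)

lemma goodMemo_getD (m j : Nat) (hj : j < 100) :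
    (goodMemo m).getD j 0 = if 3 ≤ j ∧ j ≤ m then (Nat.fib j : Int) else 0 := by
  simp [goodMemo, List.getD, hj]

lemma fib_ne_zero {j : Nat} (hj : 1 ≤ j) : (Nat.fib j : Int) ≠ 0 := by
  have := Nat.fib_pos.mpr hj
  exact_mod_cast this.ne'

-- memo hit: fibA on an index already in goodMemo (or a base case) returns fib j
lemma fibA_hit (f m j : Nat) (hj : j = 1 ∨ j = 2 ∨ (3 ≤ j ∧ j ≤ m)) (hm : m ≤ 99) :
    fibA f j (goodMemo m) = ((Nat.fib j : Int), goodMemo m) := by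
  rcases hj with h1 | h2 | ⟨h3, hjm⟩
  · subst h1; rw [fibA.eq_def]; simp
  · subst h2; rw [fibA.eq_def]; simp
  · have hj100 : j < 100 := by omega
    have hget := goodMemo_getD m j hj100
    rw [if_pos ⟨h3, hjm⟩] at hget
    rw [fibA.eq_def]
    rw [if_neg (by omega), hget, if_pos (fib_ne_zero (by omega))]

lemma goodMemo_step (i : Nat) (h3 : 3 ≤ i) (hi : i < 100) :
    (goodMemo (i - 1)).set i ((Nat.fib (i - 1) : Int) + (Nat.fib (i - 2) : Int)) = goodMemo i := by
  have hfib : (Nat.fib (i - 1) : Int) + (Nat.fib (i - 2) : Int) = (Nat.fib i : Int) := by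
    have : Nat.fib (i - 2) + Nat.fib (i - 2 + 1) = Nat.fib (i - 2 + 2) := (Nat.fib_add_two).symm
    have h1 : i - 2 + 1 = i - 1 := by omega
    have h2 : i - 2 + 2 = i := by omega
    rw [h1, h2] at this
    push_cast [← this]; ring
  rw [hfib]
  apply List.ext_getElem
  · simp [goodMemo]
  · intro j hj1 hj2
    have hj100 : j < 100 := by simpa [goodMemo] using hj2
    rw [List.getElem_set]
    by_cases hij : i = j
    · subst hij
      simp [goodMemo, List.getElem_map, List.getElem_range]
      omega
    · simp only [if_neg hij]
      simp [goodMemo, List.getElem_map, List.getElem_range]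
      have : (j ≤ i - 1) ↔ (j ≤ i) := by omega
      by_cases h3j : 3 ≤ j <;> simp [h3j, this]

-- the main fib computation of each loop iteration
lemma fibA_step (i : Nat) (h1 : 1 ≤ i) (hi : i < 100) :
    fibA i i (goodMemo (i - 1)) = ((Nat.fib i : Int), goodMemo i) := by
  by_cases hb : i = 1 ∨ i = 2
  · have hmm : goodMemo i = goodMemo (i - 1) := by
      unfold goodMemo
      congr 1; funext j
      rcases hb with h | h <;> subst h <;> (congr 1; simp; omega)
    rw [hmm]
    exact fibA_hit i (i - 1) i (by omega) (by omega)
  · have h3 : 3 ≤ i := by omega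
    have hget := goodMemo_getD (i - 1) i (by omega)
    rw [if_neg (by omega)] at hget
    conv_lhs => rw [fibA.eq_def]
    rw [if_neg (by omega), hget, if_neg (by simp)]
    obtain ⟨f, hf⟩ : ∃ f, i = f + 1 := ⟨i - 1, by omega⟩
    rw [hf]
    simp only []
    have hp : fibA f (f + 1 - 1) (goodMemo (f + 1 - 1)) = ((Nat.fib (f + 1 - 1) : Int), goodMemo (f + 1 - 1)) :=
      fibA_hit f (f + 1 - 1) (f + 1 - 1) (by omega) (by omega)
    have hq : fibA f (f + 1 - 2) (goodMemo (f + 1 - 1)) = ((Nat.fib (f + 1 - 2) : Int), goodMemo (f + 1 - 1)) :=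
      fibA_hit f (f + 1 - 1) (f + 1 - 2) (by omega) (by omega)
    rw [hp]
    simp only [hq]
    rw [goodMemo_step (f + 1) (by omega) (by omega)]
    subst hf
    simp only [Prod.mk.injEq]
    refine ⟨?_, trivial⟩
    have hf2 : 2 ≤ f := by omega
    obtain ⟨g, hg⟩ : ∃ g, f = g + 1 := ⟨f - 1, by omega⟩
    subst hg
    have hrec : Nat.fib (g + 2) = Nat.fib g + Nat.fib (g + 1) := Nat.fib_add_two
    push_cast [show g + 1 + 1 = g + 2 from rfl, hrec]
    ring

-- the two loops agree step by step
lemma loop_eq (k n : Int) :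
    ∀ t i count, 1 ≤ i → i + t = 100 →
      loopA k n i (goodMemo (i - 1)) count =
      loopB k n i (Nat.fib i : Int) (Nat.fib (i + 1) : Int) count := by
  intro t
  induction t with
  | zero =>
    intro i count h1 h100
    have : i = 100 := by omega
    subst this
    rw [loopA, loopB]
    simp
  | succ t ih =>
    intro i count h1 h100
    have hi : i < 100 := by omega
    rw [loopA, loopB]
    rw [dif_pos hi, dif_pos hi]
    simp only [fibA_step i h1 hi]
    have hnext : (goodMemo i) = goodMemo ((i + 1) - 1) := by norm_num
    have hfib2 : (Nat.fib i : Int) + (Nat.fib (i + 1) : Int) = (Nat.fib (i + 1 + 1) : Int) := by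
      push_cast [Nat.fib_add_two]; ring
    split_ifs with hmod hc
    · rfl
    · rw [hnext, ih (i + 1) (count + 1) (by omega) (by omega), hfib2]
    · rw [hnext, ih (i + 1) count (by omega) (by omega), hfib2]

lemma replicate_eq_goodMemo : List.replicate 100 (0 : Int) = goodMemo 0 := by
  apply List.ext_getElem
  · simp [goodMemo]
  · intro j hj1 hj2
    have hj100 : j < 100 := by simpa using hj1
    rw [List.getElem_replicate]
    simp [goodMemo, List.getElem_map, List.getElem_range]
    omega

-- ===== VERDICT (by name: the statement is the Claim_ definition above) =====
theorem fib_multiple_spec : Claim_equal_fib_multiple := by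
  intro k n _ _
  unfold Spec_fib_multiple fib_multiple fib_multiple_alt
  rw [replicate_eq_goodMemo]
  have h := loop_eq k n 99 1 0 (by omega) (by omega)
  simpa using h
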